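-- pv_equiv track=rewrite | github.com/1399136950/jco_test | opencv/车牌/test_1.py | getMaxDistance
-- ===== SOURCE A (Python) =====
-- def getMaxDistance(box):#获取最大垂直间距和最大水平间距
--     x_list=[]
--     y_list=[]
--     for i in range(len(box)):
--         x_list.append(box[i][0])
--         y_list.append(box[i][1])
--     x_d=max(x_list)-min(x_list)
--     y_d=max(y_list)-min(y_list)
--
--     if x_d>y_d:
--         return True
--     else:
--         return False
-- ===== SOURCE B (Python) =====
-- def getMaxDistance(box):
--     xs = sorted(p[0] for p in box)
--     ys = sorted(p[1] for p in box)
--     return xs[-1] - xs[0] > ys[-1] - ys[0]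
-- ===== Notes on version B (the rewrite author's own statement) =====
-- stated objective: alternative
-- what changed: Sort-then-pick-endpoints: each coordinate list is sorted once and the span is read off as last-minus-first element, instead of A's index loop building two lists followed by four max/min scans.
import Mathlib
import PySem

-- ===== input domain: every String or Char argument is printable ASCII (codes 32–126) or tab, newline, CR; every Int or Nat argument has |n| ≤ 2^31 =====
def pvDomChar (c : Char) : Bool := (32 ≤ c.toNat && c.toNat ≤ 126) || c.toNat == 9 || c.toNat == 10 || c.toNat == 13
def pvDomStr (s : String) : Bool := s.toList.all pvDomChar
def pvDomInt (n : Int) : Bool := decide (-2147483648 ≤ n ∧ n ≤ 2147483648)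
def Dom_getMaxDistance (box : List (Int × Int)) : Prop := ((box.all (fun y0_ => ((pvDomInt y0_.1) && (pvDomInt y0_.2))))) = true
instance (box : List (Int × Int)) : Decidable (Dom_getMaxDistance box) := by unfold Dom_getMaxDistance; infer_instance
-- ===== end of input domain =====

-- B computes each span by sorting the coordinate list once and subtracting its first element from its last, instead of A's index loop building two lists plus four max/min scans (objective: alternative).


-- ===== PORT A =====
-- 'for i in range(len(box)): x_list.append(box[i][0]); y_list.append(box[i][1])'
-- box[i] is ported with pyGetD: each i drawn from range(len(box)) is in range, so the default is never read.
def getMaxDistance (box : List (Int × Int)) : Bool :=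
  let p := (PySem.List.pyRange 0 box.length 1).foldl
    (fun (acc : List Int × List Int) i =>
      (acc.1 ++ [(PySem.List.pyGetD box i ((0 : Int), (0 : Int))).1],
       acc.2 ++ [(PySem.List.pyGetD box i ((0 : Int), (0 : Int))).2]))
    ([], [])
  match PySem.List.max? p.1 (fun v => v), PySem.List.min? p.1 (fun v => v),
        PySem.List.max? p.2 (fun v => v), PySem.List.min? p.2 (fun v => v) with
  | some mx, some nx, some my, some ny => decide (mx - nx > my - ny)
  | _, _, _, _ => false   -- unreachable under Pre_ (box ≠ []): Python raises ValueError on max([])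

-- ===== PORT B =====
-- 'xs = sorted(p[0] for p in box); ys = sorted(p[1] for p in box); return xs[-1]-xs[0] > ys[-1]-ys[0]'
def getMaxDistance_alt (box : List (Int × Int)) : Bool :=
  let xs := PySem.List.sorted (box.map Prod.fst) (fun v => v) false
  let ys := PySem.List.sorted (box.map Prod.snd) (fun v => v) false
  -- the 'none' branches are unreachable under Pre_ (box ≠ []): Python raises IndexError on [][-1]
  match PySem.List.pyGet? xs (-1) with
  | none => false
  | some xb =>
    match PySem.List.pyGet? xs 0 with
    | none => false
    | some xa =>
      match PySem.List.pyGet? ys (-1) with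
      | none => false
      | some yb =>
        match PySem.List.pyGet? ys 0 with
        | none => false
        | some ya => decide (xb - xa > yb - ya)

-- ===== PRECONDITION & SPEC =====
-- Pre_ excludes only the empty list, on which A raises ValueError (max of an empty list).
def Pre_getMaxDistance (box : List (Int × Int)) : Prop := box ≠ []
instance (box : List (Int × Int)) : Decidable (Pre_getMaxDistance box) := by unfold Pre_getMaxDistance; infer_instance
def pvWitness_getMaxDistance : (List (Int × Int)) := [(0, 0), (3, 1)]

def Spec_getMaxDistance (box : List (Int × Int)) (out : Bool) : Prop := out = getMaxDistance_alt box
instance (box : List (Int × Int)) (out : Bool) : Decidable (Spec_getMaxDistance box out) := by unfold Spec_getMaxDistance; infer_instance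

-- ===== CLAIM =====
def Claim_equal_getMaxDistance : Prop := ∀ (box : List (Int × Int)), Dom_getMaxDistance box → Pre_getMaxDistance box → Spec_getMaxDistance box (getMaxDistance box)

-- ===== LEMMAS AND PROOFS =====

-- A's index loop builds exactly the two projection lists.
theorem pvA_lists (box : List (Int × Int)) (a b : List Int) :
    box.foldl (fun (acc : List Int × List Int) v => (acc.1 ++ [v.1], acc.2 ++ [v.2])) (a, b)
      = (a ++ box.map Prod.fst, b ++ box.map Prod.snd) := by
  induction box generalizing a b with
  | nil => simp
  | cons h t ih => simp [List.foldl, ih]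

theorem pvFoldlMin_mem (t : List Int) (a : Int) : t.foldl min a ∈ a :: t := by
  induction t generalizing a with
  | nil => simp
  | cons h s ih =>
    rw [List.foldl_cons]
    rcases List.mem_cons.mp (ih (min a h)) with h1 | h1
    · rw [h1]
      rcases le_total a h with hle | hle
      · simp [min_eq_left hle]
      · simp [min_eq_right hle]
    · simp [h1]

theorem pvFoldlMin_le (t : List Int) (a : Int) : ∀ y ∈ a :: t, t.foldl min a ≤ y := by
  induction t generalizing a with
  | nil => simp
  | cons h s ih =>
    intro y hy
    rw [List.foldl_cons]
    rcases List.mem_cons.mp hy with rfl | hy'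
    · exact le_trans (ih (min y h) (min y h) (by simp)) (min_le_left _ _)
    rcases List.mem_cons.mp hy' with rfl | hy''
    · exact le_trans (ih (min a y) (min a y) (by simp)) (min_le_right _ _)
    · exact ih (min a h) y (by simp [hy''])

theorem pvFoldlMax_mem (t : List Int) (a : Int) : t.foldl max a ∈ a :: t := by
  induction t generalizing a with
  | nil => simp
  | cons h s ih =>
    rw [List.foldl_cons]
    rcases List.mem_cons.mp (ih (max a h)) with h1 | h1
    · rw [h1]
      rcases le_total a h with hle | hle
      · simp [max_eq_right hle]
      · simp [max_eq_left hle]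
    · simp [h1]

theorem pvFoldlMax_ge (t : List Int) (a : Int) : ∀ y ∈ a :: t, y ≤ t.foldl max a := by
  induction t generalizing a with
  | nil => simp
  | cons h s ih =>
    intro y hy
    rw [List.foldl_cons]
    rcases List.mem_cons.mp hy with rfl | hy'
    · exact le_trans (le_max_left y h) (ih (max y h) (max y h) (by simp))
    rcases List.mem_cons.mp hy' with rfl | hy''
    · exact le_trans (le_max_right a y) (ih (max a y) (max a y) (by simp))
    · exact ih (max a h) y (by simp [hy''])

-- In a (≤)-sorted list every element is ≤ the last one.
theorem pvLast_ge (L : List Int) (z : Int) (h : L.Pairwise (· ≤ ·))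
    (hz : L.getLast? = some z) : ∀ y ∈ L, y ≤ z := by
  induction L with
  | nil => simp at hz
  | cons a L' ih =>
    cases L' with
    | nil =>
      simp at hz
      subst hz; simp
    | cons b L'' =>
      rw [List.getLast?_cons_cons] at hz
      intro y hy
      rcases List.mem_cons.mp hy with rfl | hy
      · have hb : b ∈ b :: L'' := by simp
        have : y ≤ b := (List.pairwise_cons.mp h).1 b hb
        exact le_trans this (ih (List.pairwise_cons.mp h).2 hz b hb)
      · exact ih (List.pairwise_cons.mp h).2 hz y hy

-- sorted(a :: t)'s first element is the running min, its last the running max.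
theorem pvSorted_ends (a : Int) (t : List Int) :
    (PySem.List.sorted (a :: t) (fun v => v) false).head? = some (t.foldl min a) ∧
    (PySem.List.sorted (a :: t) (fun v => v) false).getLast? = some (t.foldl max a) := by
  set L := PySem.List.sorted (a :: t) (fun v => v) false with hL
  have hmem : ∀ y, y ∈ L ↔ y ∈ a :: t := fun y => PySem.List.mem_sorted _ _ _ _
  have hne : L ≠ [] := by
    intro h0
    have := (PySem.List.sorted_eq_nil_iff (xs := a :: t) (key := fun v => v)
      (rev := false)).mp (hL ▸ h0)
    simp at this
  obtain ⟨m, s, hcons⟩ := List.exists_cons_of_ne_nil hne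
  constructor
  · have hle : ∀ y ∈ a :: t, m ≤ y :=
      PySem.List.key_head_sorted_le _ _ (hL ▸ hcons)
    have hm_mem : m ∈ a :: t := (hmem m).mp (by simp [hcons])
    have h1 : m ≤ t.foldl min a := hle _ (pvFoldlMin_mem t a)
    have h2 : t.foldl min a ≤ m := pvFoldlMin_le t a m hm_mem
    rw [hcons]; simp [le_antisymm h1 h2]
  · have hpw : L.Pairwise (· ≤ ·) := by
      have := PySem.List.sorted_pairwise (xs := a :: t) (key := fun v => v)
      simpa using (hL ▸ this)
    obtain ⟨z, hz⟩ : ∃ z, L.getLast? = some z := by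
      cases hq : L.getLast? with
      | none => exact absurd (List.getLast?_eq_none_iff.mp hq) hne
      | some z => exact ⟨z, rfl⟩
    have hz_mem : z ∈ a :: t := (hmem z).mp (List.mem_of_getLast? hz)
    have h1 : z ≤ t.foldl max a := pvFoldlMax_ge t a z hz_mem
    have h2 : t.foldl max a ≤ z :=
      pvLast_ge L z hpw hz _ ((hmem _).mpr (pvFoldlMax_mem t a))
    rw [hz, le_antisymm h1 h2]

-- ===== VERDICT =====
theorem getMaxDistance_spec : Claim_equal_getMaxDistance := by
  intro box _ hpre
  obtain ⟨⟨x, y⟩, t, rfl⟩ := List.exists_cons_of_ne_nil hpre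
  unfold Spec_getMaxDistance getMaxDistance getMaxDistance_alt
  rw [PySem.List.foldl_pyRange_zero_pyGetD' ((x, y) :: t) ((0 : Int), (0 : Int))
        (fun (acc : List Int × List Int) v => (acc.1 ++ [v.1], acc.2 ++ [v.2]))
        (([], []) : List Int × List Int)]
  rw [pvA_lists]
  have hx := pvSorted_ends x (t.map Prod.fst)
  have hy := pvSorted_ends y (t.map Prod.snd)
  simp only [List.nil_append, List.map_cons] at *
  rw [PySem.List.max?_id_cons, PySem.List.min?_id_cons, PySem.List.max?_id_cons,
      PySem.List.min?_id_cons]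
  rw [PySem.List.pyGet?_neg_one, PySem.List.pyGet?_zero, PySem.List.pyGet?_neg_one,
      PySem.List.pyGet?_zero, ← List.head?_eq_getElem?, ← List.head?_eq_getElem?,
      hx.1, hx.2, hy.1, hy.2]
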